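-- pv_equiv track=rewrite | github.com/F1mKo/nfp | model_data.py | find_closest_arrive
-- ===== SOURCE A (Python) =====
-- def find_closest_arrive(a_, arcs_arr, arc_len, rest_time, time_horizon):  # 11 or 24 relax time duration
--     """
--     ***Cycled version*** Returns the closest arcs set to departure of arc a_ with taking into account rest time
--     :param a_: given arc
--     :param arcs_arr: set of arcs to be selected as the closest
--     :param arc_len: set of distances related to arc
--     :param rest_time: rest time before departure on given arc a_
--     :param time_horizon: time horizon
--     :return:
--     """
--     result = []
--     time = a_[2] - rest_time
--     t_closest = 2 * time_horizon
--     for a in arcs_arr[::-1]: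
--         if a[1] == a_[0]:
--             if a[2] <= time:
--                 t_between = time - a[2]
--             else:
--                 t_between = time - a[2] + time_horizon
--             if t_between <= t_closest:
--                 arc_dep_time = (a[2] - arc_len[min(a[0], a[1])]) if a[2] >= arc_len[min(a[0], a[1])] else \
--                     (a[2] - arc_len[min(a[0], a[1])] + time_horizon)
--                 if t_between < t_closest:
--                     t_closest = t_between
--                     result = [[a[0], a[1], arc_dep_time]]
--                 else:
--                     result.append([a[0], a[1], arc_dep_time])
--     return result
-- ===== SOURCE B (Python) =====
-- def find_closest_arrive(a_, arcs_arr, arc_len, rest_time, time_horizon):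
--     """Two-pass rewrite: collect (arc, wait) candidates within the cutoff, then
--     emit the rows for the minimal wait, instead of A's running-minimum state machine."""
--     time = a_[2] - rest_time
--     cands = []
--     for a in reversed(arcs_arr):
--         if a[1] == a_[0]:
--             t = time - a[2] if a[2] <= time else time - a[2] + time_horizon
--             if t <= 2 * time_horizon:
--                 cands.append((a, t))
--     if not cands:
--         return []
--     m = min(t for _, t in cands)
--     out = []
--     for a, t in cands:
--         if t == m:
--             k = min(a[0], a[1])
--             dep = a[2] - arc_len[k] if a[2] >= arc_len[k] else a[2] - arc_len[k] + time_horizon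
--             out.append([a[0], a[1], dep])
--     return out
-- ===== Notes on version B (the rewrite author's own statement) =====
-- stated objective: alternative
-- what changed: Replaces A's single-pass running-minimum state machine (mutable result list reset/extended while t_closest shrinks) by two plain passes: collect (arc, wait) candidates within the 2*time_horizon cutoff, take the minimum wait, then emit the rows for that minimum; departure times are computed only for the emitted rows.
import Mathlib
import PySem

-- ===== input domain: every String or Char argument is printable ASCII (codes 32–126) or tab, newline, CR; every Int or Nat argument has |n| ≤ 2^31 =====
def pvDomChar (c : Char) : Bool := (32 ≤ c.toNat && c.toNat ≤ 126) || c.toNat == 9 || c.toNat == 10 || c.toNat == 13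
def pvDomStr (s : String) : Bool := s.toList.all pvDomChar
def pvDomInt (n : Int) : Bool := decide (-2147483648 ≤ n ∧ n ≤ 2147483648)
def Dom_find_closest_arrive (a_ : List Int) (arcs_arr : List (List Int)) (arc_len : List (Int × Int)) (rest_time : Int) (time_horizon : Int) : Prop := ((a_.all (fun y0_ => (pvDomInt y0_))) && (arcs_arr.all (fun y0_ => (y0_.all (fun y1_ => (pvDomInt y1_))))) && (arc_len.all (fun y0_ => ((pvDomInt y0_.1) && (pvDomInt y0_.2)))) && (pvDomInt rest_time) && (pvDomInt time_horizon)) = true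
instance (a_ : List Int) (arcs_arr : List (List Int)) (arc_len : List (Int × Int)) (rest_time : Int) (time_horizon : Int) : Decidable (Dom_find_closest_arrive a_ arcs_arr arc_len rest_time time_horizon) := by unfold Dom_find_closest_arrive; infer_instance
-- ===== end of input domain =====

-- B replaces A's running-minimum state machine by two passes (collect candidates, then emit the
-- minimal-wait rows); equal return value on Pre_ (no side effects involved).

-- ===== PORT A =====
-- shared arithmetic helpers, mirroring expressions both Pythons contain verbatim
-- t_between = time - a[2] (+ time_horizon if a[2] > time)
def pvT (time H a2 : Int) : Int := if a2 ≤ time then time - a2 else time - a2 + H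
-- arc_dep_time; arc_len[min(a0,a1)] is a dict lookup: Python raises KeyError when the key is
-- absent — exact under Pre_ (key present at every attempted lookup); the default 0 is never read inside Pre_
def pvDep (arc_len : List (Int × Int)) (H a0 a1 a2 : Int) : Int :=
  let ln := PySem.Dict.getD (PySem.Dict.mk arc_len) (min a0 a1) 0
  if a2 ≥ ln then a2 - ln else a2 - ln + H
-- the row [a[0], a[1], arc_dep_time]; pyGetD is exact under Pre_ (lengths checked there)
def pvOut (arc_len : List (Int × Int)) (H : Int) (a : List Int) : List Int :=
  [PySem.List.pyGetD a 0 0, PySem.List.pyGetD a 1 0,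
   pvDep arc_len H (PySem.List.pyGetD a 0 0) (PySem.List.pyGetD a 1 0) (PySem.List.pyGetD a 2 0)]

-- the body of A's for-loop, state = (result, t_closest)
def pvStepA (a_ : List Int) (arc_len : List (Int × Int)) (time H : Int)
    (st : List (List Int) × Int) (a : List Int) : List (List Int) × Int :=
  if PySem.List.pyGetD a 1 0 = PySem.List.pyGetD a_ 0 0 then
    let t_between := pvT time H (PySem.List.pyGetD a 2 0)
    if t_between ≤ st.2 then
      let row := pvOut arc_len H a
      if t_between < st.2 then ([row], t_between) else (st.1 ++ [row], st.2)
    else st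
  else st

def find_closest_arrive (a_ : List Int) (arcs_arr : List (List Int)) (arc_len : List (Int × Int)) (rest_time : Int) (time_horizon : Int) : List (List Int) :=
  let time := PySem.List.pyGetD a_ 2 0 - rest_time
  -- arcs_arr[::-1] is List.reverse
  (arcs_arr.reverse.foldl (pvStepA a_ arc_len time time_horizon) ([], 2 * time_horizon)).1

-- ===== PORT B =====
-- pass 1: collect (arc, wait) candidates within the 2*time_horizon cutoff
def pvStepC (a_ : List Int) (time H : Int)
    (acc : List (List Int × Int)) (a : List Int) : List (List Int × Int) :=
  if PySem.List.pyGetD a 1 0 = PySem.List.pyGetD a_ 0 0 then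
    let t := pvT time H (PySem.List.pyGetD a 2 0)
    if t ≤ 2 * H then acc ++ [(a, t)] else acc
  else acc

-- pass 2: emit the rows whose wait equals the minimum m
def pvStepO (arc_len : List (Int × Int)) (H m : Int)
    (out : List (List Int)) (p : List Int × Int) : List (List Int) :=
  if p.2 = m then out ++ [pvOut arc_len H p.1] else out

def find_closest_arrive_alt (a_ : List Int) (arcs_arr : List (List Int)) (arc_len : List (Int × Int)) (rest_time : Int) (time_horizon : Int) : List (List Int) :=
  let time := PySem.List.pyGetD a_ 2 0 - rest_time
  let cands := arcs_arr.reverse.foldl (pvStepC a_ time time_horizon) []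
  match PySem.List.min? (cands.map Prod.snd) (fun t => t) with
  | none => []
  | some m => cands.foldl (pvStepO arc_len time_horizon m) []

-- ===== PRECONDITION & SPEC =====
-- Pre_ excludes exactly the inputs on which Python A raises: IndexError (len(a_) < 3, an arc of
-- length < 2, or a matching arc of length < 3) or KeyError — the lookup arc_len[min(a[0],a[1])]
-- is actually attempted (the arc matches, its wait is within the 2*time_horizon cutoff and is a
-- running minimum among the earlier-scanned matching waits within the cutoff) and the key is
-- absent.  On every input admitted by Pre_ A returns normally.
def Pre_find_closest_arrive (a_ : List Int) (arcs_arr : List (List Int)) (arc_len : List (Int × Int)) (rest_time : Int) (time_horizon : Int) : Prop :=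
  3 ≤ a_.length ∧
  (∀ a ∈ arcs_arr, 2 ≤ a.length ∧
    (PySem.List.pyGetD a 1 0 = PySem.List.pyGetD a_ 0 0 → 3 ≤ a.length)) ∧
  (∀ i : Fin arcs_arr.reverse.length,
    PySem.List.pyGetD (arcs_arr.reverse.get i) 1 0 = PySem.List.pyGetD a_ 0 0 →
    pvT (PySem.List.pyGetD a_ 2 0 - rest_time) time_horizon (PySem.List.pyGetD (arcs_arr.reverse.get i) 2 0) ≤ 2 * time_horizon →
    (∀ j : Fin arcs_arr.reverse.length, j.val < i.val →
      PySem.List.pyGetD (arcs_arr.reverse.get j) 1 0 = PySem.List.pyGetD a_ 0 0 →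
      pvT (PySem.List.pyGetD a_ 2 0 - rest_time) time_horizon (PySem.List.pyGetD (arcs_arr.reverse.get j) 2 0) ≤ 2 * time_horizon →
      pvT (PySem.List.pyGetD a_ 2 0 - rest_time) time_horizon (PySem.List.pyGetD (arcs_arr.reverse.get i) 2 0) ≤
        pvT (PySem.List.pyGetD a_ 2 0 - rest_time) time_horizon (PySem.List.pyGetD (arcs_arr.reverse.get j) 2 0)) →
    PySem.Dict.contains (PySem.Dict.mk arc_len)
      (min (PySem.List.pyGetD (arcs_arr.reverse.get i) 0 0) (PySem.List.pyGetD (arcs_arr.reverse.get i) 1 0)) = true)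
instance (a_ : List Int) (arcs_arr : List (List Int)) (arc_len : List (Int × Int)) (rest_time : Int) (time_horizon : Int) : Decidable (Pre_find_closest_arrive a_ arcs_arr arc_len rest_time time_horizon) := by unfold Pre_find_closest_arrive; infer_instance

def pvWitness_find_closest_arrive : List Int × List (List Int) × (List (Int × Int)) × Int × Int :=
  ([0, 0, 10], [[1, 0, 9], [2, 0, 9]], [(0, 5)], 0, 100)

def Spec_find_closest_arrive (a_ : List Int) (arcs_arr : List (List Int)) (arc_len : List (Int × Int)) (rest_time : Int) (time_horizon : Int) (out : List (List Int)) : Prop := out = find_closest_arrive_alt a_ arcs_arr arc_len rest_time time_horizon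
instance (a_ : List Int) (arcs_arr : List (List Int)) (arc_len : List (Int × Int)) (rest_time : Int) (time_horizon : Int) (out : List (List Int)) : Decidable (Spec_find_closest_arrive a_ arcs_arr arc_len rest_time time_horizon out) := by unfold Spec_find_closest_arrive; infer_instance

-- ===== CLAIM (what is proved, stated in full; the proofs are below) =====
def Claim_equal_find_closest_arrive : Prop := ∀ (a_ : List Int) (arcs_arr : List (List Int)) (arc_len : List (Int × Int)) (rest_time : Int) (time_horizon : Int), Dom_find_closest_arrive a_ arcs_arr arc_len rest_time time_horizon → Pre_find_closest_arrive a_ arcs_arr arc_len rest_time time_horizon → Spec_find_closest_arrive a_ arcs_arr arc_len rest_time time_horizon (find_closest_arrive a_ arcs_arr arc_len rest_time time_horizon)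

-- ===== LEMMAS AND PROOFS =====

-- the candidate predicate of B's first pass, as a Bool
def pvIsCand (a_ : List Int) (time H : Int) (a : List Int) : Bool :=
  (PySem.List.pyGetD a 1 0 == PySem.List.pyGetD a_ 0 0) &&
    decide (pvT time H (PySem.List.pyGetD a 2 0) ≤ 2 * H)

-- B's pass 1 is filter + map
lemma foldl_stepC (a_ : List Int) (time H : Int) (l : List (List Int)) (acc : List (List Int × Int)) :
    l.foldl (pvStepC a_ time H) acc =
      acc ++ (l.filter (pvIsCand a_ time H)).map (fun a => (a, pvT time H (PySem.List.pyGetD a 2 0))) := by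
  have h : pvStepC a_ time H = fun acc a =>
      if pvIsCand a_ time H a then acc ++ [(a, pvT time H (PySem.List.pyGetD a 2 0))] else acc := by
    funext acc a
    simp only [pvStepC, pvIsCand]
    by_cases h1 : PySem.List.pyGetD a 1 0 = PySem.List.pyGetD a_ 0 0 <;>
      by_cases h2 : pvT time H (PySem.List.pyGetD a 2 0) ≤ 2 * H <;> simp [h1, h2]
  rw [h, PySem.List.foldl_append_if]

-- B's pass 2 is filter + map
lemma foldl_stepO (arc_len : List (Int × Int)) (H m : Int) (c : List (List Int × Int)) (acc : List (List Int)) :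
    c.foldl (pvStepO arc_len H m) acc =
      acc ++ (c.filter (fun p => p.2 == m)).map (fun p => pvOut arc_len H p.1) := by
  have h : pvStepO arc_len H m = fun acc p =>
      if (p.2 == m) then acc ++ [pvOut arc_len H p.1] else acc := by
    funext acc p; simp [pvStepO]
  rw [h, PySem.List.foldl_append_if]

-- characterisation of A's loop: from any state (res, tc) with tc ≤ 2*H, the loop ends with the
-- running minimum m = foldl min tc (waits of candidates), and its result is the minimal-wait rows
-- (prepended with res only when no candidate improved on tc).
lemma foldl_stepA (a_ : List Int) (arc_len : List (Int × Int)) (time H : Int) :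
    ∀ (l : List (List Int)) (res : List (List Int)) (tc : Int), tc ≤ 2 * H →
      l.foldl (pvStepA a_ arc_len time H) (res, tc) =
        (let c := (l.filter (pvIsCand a_ time H)).map (fun a => (a, pvT time H (PySem.List.pyGetD a 2 0)))
         let m := (c.map Prod.snd).foldl min tc
         ((if m < tc then [] else res) ++ (c.filter (fun p => p.2 == m)).map (fun p => pvOut arc_len H p.1), m)) := by
  intro l
  induction l with
  | nil => intro res tc htc; simp
  | cons a l ih =>
    intro res tc htc
    by_cases h1 : PySem.List.pyGetD a 1 0 = PySem.List.pyGetD a_ 0 0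
    · set t := pvT time H (PySem.List.pyGetD a 2 0) with ht
      by_cases h2 : t ≤ 2 * H
      · have hcand : pvIsCand a_ time H a = true := by
          simp [pvIsCand, h1, ← ht, h2]
        by_cases h3 : t < tc
        · -- strictly smaller: reset
          have hstep : pvStepA a_ arc_len time H (res, tc) a = ([pvOut arc_len H a], t) := by
            simp [pvStepA, h1, ← ht, le_of_lt h3, h3]
          rw [List.foldl_cons, hstep, ih [pvOut arc_len H a] t h2]
          simp only [hcand, List.filter_cons_of_pos, List.map_cons, List.foldl_cons]
          set ts := (((l.filter (pvIsCand a_ time H)).map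
            (fun a => (a, pvT time H (PySem.List.pyGetD a 2 0)))).map Prod.snd)
          have hmin : min tc t = t := min_eq_right (le_of_lt h3)
          have hm : ts.foldl min t ≤ t := (PySem.List.foldl_min_le ts t).1
          rw [hmin]
          by_cases h4 : ts.foldl min t < t
          · have hne : ¬ (pvT time H (PySem.List.pyGetD a 2 0) = ts.foldl min t) := by
              rw [← ht]; omega
            simp [if_pos h4, if_pos (lt_trans h4 h3), hne, beq_iff_eq]
          · have heq : ts.foldl min t = t := le_antisymm hm (by omega)
            have hpe : pvT time H (PySem.List.pyGetD a 2 0) = t := ht.symm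
            simp [heq, hpe, h3]
        · -- t ≥ tc
          by_cases h4 : t ≤ tc
          · -- equal: append
            have hteq : t = tc := le_antisymm h4 (by omega)
            have hstep : pvStepA a_ arc_len time H (res, tc) a = (res ++ [pvOut arc_len H a], tc) := by
              simp [pvStepA, h1, ← ht, h4, h3]
            rw [List.foldl_cons, hstep, ih (res ++ [pvOut arc_len H a]) tc htc]
            simp only [hcand, List.filter_cons_of_pos, List.map_cons, List.foldl_cons]
            set ts := (((l.filter (pvIsCand a_ time H)).map
              (fun a => (a, pvT time H (PySem.List.pyGetD a 2 0)))).map Prod.snd)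
            have hmin : min tc t = tc := min_eq_left (le_of_eq hteq.symm)
            have hm : ts.foldl min tc ≤ tc := (PySem.List.foldl_min_le ts tc).1
            rw [hmin]
            by_cases h5 : ts.foldl min tc < tc
            · have hne : ¬ (pvT time H (PySem.List.pyGetD a 2 0) = ts.foldl min tc) := by
                rw [← ht]; omega
              simp [if_pos h5, hne, beq_iff_eq]
            · have heq : ts.foldl min tc = tc := le_antisymm hm (by omega)
              have hpe : pvT time H (PySem.List.pyGetD a 2 0) = tc := by rw [← ht]; omega
              simp [heq, hpe]
          · -- larger: skip, but still a candidate of B (filtered out later)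
            have hstep : pvStepA a_ arc_len time H (res, tc) a = (res, tc) := by
              simp [pvStepA, h1, ← ht, h4]
            rw [List.foldl_cons, hstep, ih res tc htc]
            simp only [hcand, List.filter_cons_of_pos, List.map_cons, List.foldl_cons]
            set ts := (((l.filter (pvIsCand a_ time H)).map
              (fun a => (a, pvT time H (PySem.List.pyGetD a 2 0)))).map Prod.snd)
            have hmin : min tc t = tc := min_eq_left (by omega)
            have hm : ts.foldl min tc ≤ tc := (PySem.List.foldl_min_le ts tc).1
            rw [hmin]
            have hne : ¬ (pvT time H (PySem.List.pyGetD a 2 0) = ts.foldl min tc) := by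
              rw [← ht]; omega
            simp [hne, beq_iff_eq]
      · -- beyond the cutoff: t > 2*H ≥ tc, A skips and B never records it
        have hcand : pvIsCand a_ time H a = false := by
          simp [pvIsCand, ← ht, h2]
        have hstep : pvStepA a_ arc_len time H (res, tc) a = (res, tc) := by
          have hnt : ¬ t ≤ tc := by omega
          simp [pvStepA, h1, ← ht, hnt]
        rw [List.foldl_cons, hstep, ih res tc htc]
        simp [hcand]
    · -- non-matching arc: both sides skip
      have hcand : pvIsCand a_ time H a = false := by simp [pvIsCand, h1]
      have hstep : pvStepA a_ arc_len time H (res, tc) a = (res, tc) := by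
        simp [pvStepA, h1]
      rw [List.foldl_cons, hstep, ih res tc htc]
      simp [hcand]

-- every recorded wait is within the cutoff
lemma cand_le (a_ : List Int) (time H : Int) (l : List (List Int)) :
    ∀ t ∈ ((l.filter (pvIsCand a_ time H)).map
        (fun a => (a, pvT time H (PySem.List.pyGetD a 2 0)))).map Prod.snd, t ≤ 2 * H := by
  intro t ht
  simp only [List.map_map, List.mem_map, Function.comp] at ht
  obtain ⟨a, ha, rfl⟩ := ht
  have h := List.of_mem_filter ha
  simp only [pvIsCand, Bool.and_eq_true, decide_eq_true_eq] at h
  exact h.2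

-- ===== VERDICT (by name: the statement is the Claim_ definition above) =====
theorem find_closest_arrive_spec : Claim_equal_find_closest_arrive := by
  intro a_ arcs_arr arc_len rest_time time_horizon _ _
  unfold Spec_find_closest_arrive find_closest_arrive find_closest_arrive_alt
  show (arcs_arr.reverse.foldl
      (pvStepA a_ arc_len (PySem.List.pyGetD a_ 2 0 - rest_time) time_horizon) ([], 2 * time_horizon)).1 =
    (match PySem.List.min?
        ((arcs_arr.reverse.foldl (pvStepC a_ (PySem.List.pyGetD a_ 2 0 - rest_time) time_horizon) []).map Prod.snd)
        (fun t => t) with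
     | none => []
     | some m =>
        (arcs_arr.reverse.foldl (pvStepC a_ (PySem.List.pyGetD a_ 2 0 - rest_time) time_horizon) []).foldl
          (pvStepO arc_len time_horizon m) [])
  set time := PySem.List.pyGetD a_ 2 0 - rest_time with htime
  set H := time_horizon with hH
  rw [foldl_stepA a_ arc_len time H arcs_arr.reverse [] (2 * H) le_rfl,
      foldl_stepC a_ time H arcs_arr.reverse []]
  set c := (arcs_arr.reverse.filter (pvIsCand a_ time H)).map
      (fun a => (a, pvT time H (PySem.List.pyGetD a 2 0))) with hc
  cases hts : c.map Prod.snd with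
  | nil =>
    have : c = [] := by simpa using congrArg List.length hts
    simp [this, PySem.List.min?]
  | cons t0 rest =>
    have ht0 : t0 ≤ 2 * H := by
      exact cand_le a_ time H arcs_arr.reverse t0 (by rw [← hc, hts]; exact List.mem_cons_self ..)
    have hfold : (t0 :: rest).foldl min (2 * H) = rest.foldl min t0 := by
      simp [List.foldl_cons, min_eq_right ht0]
    rw [List.nil_append, hts, PySem.List.min?_id_cons]
    dsimp only
    rw [hts, hfold, foldl_stepO]
    by_cases h : rest.foldl min t0 < 2 * H
    · simp [h]
    · simp [h]
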